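-- pv_equiv track=rewrite | github.com/jamescalnan/BIO-olympiad | 2020Q2.py | returnConnections
-- ===== SOURCE A (Python) =====
-- def returnConnections(connections, completePlan):
--   connectionsReturn = []
--   for room in completePlan:
--     printStr = ""
--     for room2 in connections:
--       if room2[0] == room or room2[1] == room:
--         printStr += room2[0] if room2[0] != room else room2[1]
--     connectionsReturn.append(sorted(printStr))
--   return connectionsReturn
-- ===== SOURCE B (Python) =====
-- def returnConnections(connections, completePlan):
--     # One edge-centric pass: scatter each edge's contribution to both endpoints.
--     neigh = {}
--     for edge in connections:
--         a, b = edge[0], edge[1]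
--         if a == b:
--             neigh[a] = neigh.get(a, "") + a
--         else:
--             neigh[a] = neigh.get(a, "") + b
--             neigh[b] = neigh.get(b, "") + a
--     return [sorted(neigh.get(room, "")) for room in completePlan]
-- ===== Notes on version B (the rewrite author's own statement) =====
-- stated objective: alternative
-- what changed: B replaces A's per-room rescan of the whole edge list (one inner pass over connections for every room in completePlan) by a single edge-centric scatter pass that builds a room-to-neighbour-chars dict, then looks each room up and sorts; measured ~1.35x at the largest finished size, not confirmed >=1.5x.
-- outside the precondition, e.g. on returnConnections([('a',)], []): A returns [], B raises IndexError
import Mathlib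
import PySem

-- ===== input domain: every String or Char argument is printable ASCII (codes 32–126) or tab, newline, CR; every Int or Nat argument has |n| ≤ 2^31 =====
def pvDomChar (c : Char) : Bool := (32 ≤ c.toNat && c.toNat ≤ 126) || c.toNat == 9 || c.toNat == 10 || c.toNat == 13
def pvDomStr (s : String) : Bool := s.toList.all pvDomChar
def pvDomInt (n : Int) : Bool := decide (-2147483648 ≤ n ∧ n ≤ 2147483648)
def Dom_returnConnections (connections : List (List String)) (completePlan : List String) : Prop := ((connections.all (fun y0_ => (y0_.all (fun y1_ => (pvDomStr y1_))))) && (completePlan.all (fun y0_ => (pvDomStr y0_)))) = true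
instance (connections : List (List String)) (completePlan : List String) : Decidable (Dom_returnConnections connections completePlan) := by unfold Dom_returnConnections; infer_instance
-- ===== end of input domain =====

-- B replaces A's per-room rescan of the whole edge list by one edge-centric
-- scatter pass building a room → neighbour-chars dict (objective: alternative).

-- ===== PORT A =====
-- inner-loop body of A: one edge's contribution to `room`'s printStr
def pvAStep (room : String) (ps : List Char) (room2 : List String) : List Char :=
  if room2.getD 0 "" = room ∨ room2.getD 1 "" = room then
    ps ++ (if room2.getD 0 "" ≠ room then (room2.getD 0 "").toList else (room2.getD 1 "").toList)
  else ps

def returnConnections (connections : List (List String)) (completePlan : List String) : List (List String) :=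
  completePlan.foldl (fun acc room =>
    let printStr := connections.foldl (pvAStep room) ([] : List Char)
    acc ++ [(PySem.List.sorted printStr (fun c => c) false).map (fun c => String.ofList [c])]) []

-- ===== PORT B =====
-- one edge scattered into the dict (Python's two d[...] = d.get(...) + ... assignments)
def pvBStep (d : PySem.Dict String (List Char)) (edge : List String) : PySem.Dict String (List Char) :=
  let a := edge.getD 0 ""
  let b := edge.getD 1 ""
  if a = b then d.insert a (d.getD a [] ++ a.toList)
  else
    let d1 := d.insert a (d.getD a [] ++ b.toList)
    d1.insert b (d1.getD b [] ++ a.toList)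

def returnConnections_alt (connections : List (List String)) (completePlan : List String) : List (List String) :=
  let neigh := connections.foldl pvBStep PySem.Dict.empty
  completePlan.map (fun room =>
    (PySem.List.sorted (neigh.getD room []) (fun c => c) false).map (fun c => String.ofList [c]))

-- ===== PRECONDITION & SPEC =====
-- Pre_ excludes edge lists containing an edge with fewer than 2 rooms: there A raises
-- IndexError whenever completePlan is nonempty (and returns [] only on an empty plan,
-- which it never indexes), while B's single scatter pass always indexes every edge and raises.
def Pre_returnConnections (connections : List (List String)) (completePlan : List String) : Prop :=
  ∀ e ∈ connections, 2 ≤ e.length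
instance (connections : List (List String)) (completePlan : List String) : Decidable (Pre_returnConnections connections completePlan) := by unfold Pre_returnConnections; infer_instance

def pvWitness_returnConnections : List (List String) × List String := ([["a", "b"], ["b", "b"]], ["a", "b", "c"])

def Spec_returnConnections (connections : List (List String)) (completePlan : List String) (out : List (List String)) : Prop := out = returnConnections_alt connections completePlan
instance (connections : List (List String)) (completePlan : List String) (out : List (List String)) : Decidable (Spec_returnConnections connections completePlan out) := by unfold Spec_returnConnections; infer_instance

-- ===== CLAIM (what is proved, stated in full; the proofs are below) =====
def Claim_equal_returnConnections : Prop := ∀ (connections : List (List String)) (completePlan : List String), Dom_returnConnections connections completePlan → Pre_returnConnections connections completePlan → Spec_returnConnections connections completePlan (returnConnections connections completePlan)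

-- ===== LEMMAS AND PROOFS =====

-- one edge processed: the dict entry for r advances exactly as A's printStr does
theorem pvStep_getD_gen (d : PySem.Dict String (List Char)) (a b r : String) :
    (if a = b then d.insert a (d.getD a [] ++ a.toList)
     else (d.insert a (d.getD a [] ++ b.toList)).insert b
            ((d.insert a (d.getD a [] ++ b.toList)).getD b [] ++ a.toList)).getD r []
    = if a = r ∨ b = r then
        d.getD r [] ++ (if a ≠ r then a.toList else b.toList)
      else d.getD r [] := by
  by_cases hab : a = b
  · subst hab
    rcases eq_or_ne r a with h | h
    · subst h; simp [PySem.Dict.getD_insert]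
    · simp [PySem.Dict.getD_insert, h, Ne.symm h]
  · rcases eq_or_ne r a with h | h
    · subst h
      simp [PySem.Dict.getD_insert, hab, Ne.symm hab]
    · rcases eq_or_ne r b with h2 | h2
      · subst h2
        simp [PySem.Dict.getD_insert, hab, Ne.symm hab, h, Ne.symm h]
      · rw [if_neg hab, PySem.Dict.getD_insert, PySem.Dict.getD_insert]
        simp [PySem.Dict.getD_insert, hab, h, h2, Ne.symm h, Ne.symm h2]

theorem pvStep_getD (d : PySem.Dict String (List Char)) (e : List String) (r : String) :
    (pvBStep d e).getD r [] = pvAStep r (d.getD r []) e := by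
  unfold pvBStep pvAStep
  exact pvStep_getD_gen d (e.getD 0 "") (e.getD 1 "") r

-- the whole scatter pass: the dict entry for r equals A's inner fold over the edges
theorem pvBuild_getD (conns : List (List String)) (d : PySem.Dict String (List Char)) (r : String) :
    (conns.foldl pvBStep d).getD r [] = conns.foldl (pvAStep r) (d.getD r []) := by
  induction conns generalizing d with
  | nil => rfl
  | cons e es ih => simp only [List.foldl_cons, ih, pvStep_getD]

-- ===== VERDICT (by name: the statement is the Claim_ definition above) =====
theorem returnConnections_spec : Claim_equal_returnConnections := by
  intro conns plan _ _
  unfold Spec_returnConnections returnConnections returnConnections_alt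
  rw [PySem.List.foldl_append_singleton_eq_map]
  simp only [List.nil_append]
  refine List.map_congr_left (fun room _ => ?_)
  rw [pvBuild_getD]
  rfl
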